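-- pv_equiv track=rewrite | github.com/power16one5/algorithm-study | parkkyungwon/solved.ac/class 5/12100 2048 (Easy).py | vector_compress
-- ===== SOURCE A (Python) =====
-- def vector_compress(arr, rev=False):
--     filtered_arr = [a for a in (arr[::-1] if rev else arr) if a]
--     end = len(filtered_arr) - 1
--     compressed = []
--
--     i = 0
--     while i < end:
--         if filtered_arr[i] == filtered_arr[i+1]:
--             compressed.append(filtered_arr[i] << 1)
--             i += 2
--
--         else:
--             compressed.append(filtered_arr[i])
--             i += 1
--
--     if i == end: compressed.append(filtered_arr[i])
--
--     return compressed[::-1] if rev else compressed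
-- ===== SOURCE B (Python) =====
-- def vector_compress(arr, rev=False):
--     tiles = [a for a in (arr[::-1] if rev else arr) if a]
--     result = []
--     last_merged = False
--     for t in tiles:
--         if result and result[-1] == t and not last_merged:
--             result[-1] = result[-1] << 1
--             last_merged = True
--         else:
--             result.append(t)
--             last_merged = False
--     return result[::-1] if rev else result
-- ===== Notes on version B (the rewrite author's own statement) =====
-- stated objective: simpler
-- what changed: A's index-driven while-loop with a look-ahead compare, i+=2 skip and a separate trailing-element append is replaced by one for-loop over the tiles that merges each tile into the last result slot guarded by a last_merged flag.
import Mathlib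
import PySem

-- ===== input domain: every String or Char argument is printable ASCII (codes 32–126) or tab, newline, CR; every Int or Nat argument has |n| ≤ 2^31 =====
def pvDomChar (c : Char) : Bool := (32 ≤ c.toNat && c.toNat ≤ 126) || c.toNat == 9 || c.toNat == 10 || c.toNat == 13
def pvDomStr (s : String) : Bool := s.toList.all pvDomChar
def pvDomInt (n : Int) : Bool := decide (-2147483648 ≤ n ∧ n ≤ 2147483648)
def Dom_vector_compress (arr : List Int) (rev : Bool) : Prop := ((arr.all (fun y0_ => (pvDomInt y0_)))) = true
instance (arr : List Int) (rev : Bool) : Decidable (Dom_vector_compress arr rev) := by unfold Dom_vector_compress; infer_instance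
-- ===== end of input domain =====

-- B simplifies A's index-driven look-ahead while-loop into one for-loop over the tiles with a last_merged flag (objective: simpler).

-- ===== PORT A =====
-- A's while-loop: i walks the filtered list, comparing filtered[i] with filtered[i+1];
-- after the loop, if i == end the trailing element is appended.  Indices are always in
-- range (0 ≤ i ≤ end < length on every access), so getD with default 0 is exact.
-- Python's `x << 1` on an int is exactly `x * 2` (also for negatives).
def vcLoopA (f : List Int) (endI : Int) (i : Int) (comp : List Int) : List Int :=
  if i < endI then
    if f.getD i.toNat 0 = f.getD (i + 1).toNat 0 then
      vcLoopA f endI (i + 2) (comp ++ [f.getD i.toNat 0 * 2])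
    else
      vcLoopA f endI (i + 1) (comp ++ [f.getD i.toNat 0])
  else if i = endI then comp ++ [f.getD i.toNat 0]
  else comp
termination_by (endI - i).toNat
decreasing_by all_goals omega

-- `arr[::-1]` is List.reverse (exact); `if a` on an int is `a ≠ 0` (exact).
def vector_compress (arr : List Int) (rev : Bool) : List Int :=
  let filtered := (if rev then arr.reverse else arr).filter (fun a => a != 0)
  let compressed := vcLoopA filtered ((filtered.length : Int) - 1) 0 []
  if rev then compressed.reverse else compressed

-- ===== PORT B =====
-- B's for-loop over the tiles: merge the tile into the last result slot when it equals it and the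
-- last slot was not itself produced by a merge; the last-slot read and in-place doubling become
-- getLast? / dropLast ++ [t * 2] (the condition guarantees result[-1] == t).
def vcLoopB (res : List Int) (lastMerged : Bool) : List Int → List Int
  | [] => res
  | t :: rest =>
    if !res.isEmpty && res.getLast? == some t && !lastMerged then
      vcLoopB (res.dropLast ++ [t * 2]) true rest
    else
      vcLoopB (res ++ [t]) false rest

def vector_compress_alt (arr : List Int) (rev : Bool) : List Int :=
  let tiles := (if rev then arr.reverse else arr).filter (fun a => a != 0)
  let result := vcLoopB [] false tiles
  if rev then result.reverse else result

-- ===== PRECONDITION & SPEC =====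
def Spec_vector_compress (arr : List Int) (rev : Bool) (out : List Int) : Prop := out = vector_compress_alt arr rev
instance (arr : List Int) (rev : Bool) (out : List Int) : Decidable (Spec_vector_compress arr rev out) := by unfold Spec_vector_compress; infer_instance

-- ===== CLAIM (what is proved, stated in full; the proofs are below) =====
def Claim_equal_vector_compress : Prop := ∀ (arr : List Int) (rev : Bool), Dom_vector_compress arr rev → Spec_vector_compress arr rev (vector_compress arr rev)

-- ===== LEMMAS AND PROOFS =====

-- reference merge: both loops compute this structural recursion on the filtered list
def pvMerge : List Int → List Int
  | [] => []
  | [a] => [a]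
  | a :: b :: rest =>
    if a = b then a * 2 :: pvMerge rest else a :: pvMerge (b :: rest)
termination_by l => l.length

theorem vcLoopA_go (f : List Int) (n : Nat) : ∀ (i : Int) (comp : List Int),
    0 ≤ i → f.length ≤ i.toNat + n →
    vcLoopA f ((f.length : Int) - 1) i comp = comp ++ pvMerge (f.drop i.toNat) := by
  induction n with
  | zero =>
    intro i comp h0 hn
    have hge : ¬ i < (f.length : Int) - 1 := by omega
    have hne : ¬ i = (f.length : Int) - 1 := by omega
    rw [vcLoopA, if_neg hge, if_neg hne, List.drop_eq_nil_of_le (by omega)]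
    simp [pvMerge]
  | succ n ih =>
    intro i comp h0 hn
    by_cases h : i < (f.length : Int) - 1
    · have hi : i.toNat < f.length := by omega
      have hi1 : i.toNat + 1 < f.length := by omega
      have hd : f.drop i.toNat = f[i.toNat] :: f.drop (i.toNat + 1) :=
        List.drop_eq_getElem_cons hi
      have hd1 : f.drop (i.toNat + 1) = f[i.toNat + 1] :: f.drop (i.toNat + 2) :=
        List.drop_eq_getElem_cons hi1
      have g0 : f.getD i.toNat 0 = f[i.toNat] := List.getD_eq_getElem f 0 hi
      have e1 : (i + 1).toNat = i.toNat + 1 := by omega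
      have g1 : f.getD (i + 1).toNat 0 = f[i.toNat + 1] := by
        rw [e1]; exact List.getD_eq_getElem f 0 hi1
      rw [vcLoopA, if_pos h, g0, g1]
      by_cases heq : f[i.toNat] = f[i.toNat + 1]
      · rw [if_pos heq]
        have e2 : (i + 2).toNat = i.toNat + 2 := by omega
        rw [ih (i + 2) _ (by omega) (by omega), e2, hd, hd1, pvMerge, if_pos heq]
        simp
      · rw [if_neg heq]
        rw [ih (i + 1) _ (by omega) (by omega), e1, hd, hd1, pvMerge, if_neg heq]
        rw [← hd1]
        simp
    · by_cases he : i = (f.length : Int) - 1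
      · have hlen : 1 ≤ f.length := by omega
        have hi : i.toNat < f.length := by omega
        have g0 : f.getD i.toNat 0 = f[i.toNat] := List.getD_eq_getElem f 0 hi
        have hd : f.drop i.toNat = f[i.toNat] :: f.drop (i.toNat + 1) :=
          List.drop_eq_getElem_cons hi
        have hd1 : f.drop (i.toNat + 1) = [] := List.drop_eq_nil_of_le (by omega)
        rw [vcLoopA, if_neg h, if_pos he, g0, hd, hd1]
        simp [pvMerge]
      · rw [vcLoopA, if_neg h, if_neg he, List.drop_eq_nil_of_le (by omega)]
        simp [pvMerge]

theorem vcLoopB_spec (ts : List Int) :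
    (∀ r : List Int, vcLoopB r true ts = r ++ pvMerge ts) ∧
    (∀ (r : List Int) (a : Int), vcLoopB (r ++ [a]) false ts = r ++ pvMerge (a :: ts)) := by
  induction ts with
  | nil =>
    exact ⟨fun r => by simp [vcLoopB, pvMerge], fun r a => by simp [vcLoopB, pvMerge]⟩
  | cons t rest ih =>
    obtain ⟨ihT, ihF⟩ := ih
    constructor
    · intro r
      rw [vcLoopB, if_neg (by simp)]
      exact ihF r t
    · intro r a
      rw [vcLoopB]
      by_cases hat : a = t
      · subst hat
        rw [if_pos (by simp), List.dropLast_concat, ihT (r ++ [a * 2])]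
        rw [show pvMerge (a :: a :: rest) = a * 2 :: pvMerge rest from by
          rw [pvMerge, if_pos rfl]]
        simp
      · rw [if_neg (by simp [hat])]
        have := ihF (r ++ [a]) t
        rw [show pvMerge (a :: t :: rest) = a :: pvMerge (t :: rest) from by
          rw [pvMerge, if_neg hat]]
        simpa using this

theorem vcLoopB_nil (ts : List Int) : vcLoopB [] false ts = pvMerge ts := by
  cases ts with
  | nil => simp [vcLoopB, pvMerge]
  | cons t rest =>
    rw [vcLoopB, if_neg (by simp)]
    exact (vcLoopB_spec rest).2 [] t

theorem loops_agree (f : List Int) :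
    vcLoopA f ((f.length : Int) - 1) 0 [] = vcLoopB [] false f := by
  rw [vcLoopB_nil, vcLoopA_go f f.length 0 [] le_rfl (by omega)]
  simp

-- ===== VERDICT (by name: the statement is the Claim_ definition above) =====
theorem vector_compress_spec : Claim_equal_vector_compress := by
  intro arr rev _
  unfold Spec_vector_compress vector_compress vector_compress_alt
  simp only [loops_agree]
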